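-- pv_equiv track=rewrite | github.com/xchang1121/AutoResearch-CC-hook | .autoresearch/scripts/phase_machine.py | _strip_shell_quotes
-- ===== SOURCE A (Python) =====
-- def _strip_shell_quotes(command: str) -> str:
--     """Blank quoted spans so XML/text payloads do not look like redirection."""
--     out = []
--     quote = None
--     escaped = False
--     for ch in command:
--         if quote:
--             if escaped:
--                 escaped = False
--             elif quote == '"' and ch == "\\":
--                 escaped = True
--             elif ch == quote:
--                 quote = None
--             out.append(" ")
--             continue
--         if ch in ("'", '"'):
--             quote = ch
--             out.append(" ")
--         else:
--             out.append(ch)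
--     return "".join(out)
-- ===== SOURCE B (Python) =====
-- def _strip_shell_quotes(command: str) -> str:
--     """Blank quoted spans so XML/text payloads do not look like redirection."""
--     parts = []
--     i = 0
--     n = len(command)
--     while i < n:
--         ch = command[i]
--         if ch == "'":
--             j = command.find("'", i + 1)
--             end = n if j == -1 else j + 1
--             parts.append(" " * (end - i))
--             i = end
--         elif ch == '"':
--             j = i + 1
--             while j < n:
--                 if command[j] == "\\":
--                     j += 2
--                 elif command[j] == '"':
--                     j += 1
--                     break
--                 else:
--                     j += 1
--             end = min(j, n)
--             parts.append(" " * (end - i))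
--             i = end
--         else:
--             parts.append(ch)
--             i += 1
--     return "".join(parts)
-- ===== Notes on version B (the rewrite author's own statement) =====
-- stated objective: alternative
-- what changed: Replaced the per-character quote/escape state machine with a span-jumping scan that finds each closing quote (str.find for single quotes, a backslash-skipping index loop for double quotes) and blanks the whole quoted span at once.
import Mathlib
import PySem

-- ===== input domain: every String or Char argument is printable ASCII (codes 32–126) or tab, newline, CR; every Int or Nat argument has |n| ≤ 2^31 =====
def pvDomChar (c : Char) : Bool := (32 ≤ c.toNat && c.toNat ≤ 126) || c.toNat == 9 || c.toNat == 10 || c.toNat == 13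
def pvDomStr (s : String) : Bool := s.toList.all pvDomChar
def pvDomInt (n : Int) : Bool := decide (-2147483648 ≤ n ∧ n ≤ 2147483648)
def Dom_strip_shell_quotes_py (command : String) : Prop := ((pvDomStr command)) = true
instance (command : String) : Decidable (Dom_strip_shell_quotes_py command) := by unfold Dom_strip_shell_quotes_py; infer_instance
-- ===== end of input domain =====

-- B replaces A's per-character quote/escape state machine by a span-jumping scan
-- (find the closing quote, blank the whole span at once); alternative structure, same output.

-- ===== PORT A =====
-- one iteration of A's for-loop: state (out, quote, escaped)
def pvAStep (st : List Char × Option Char × Bool) (ch : Char) : List Char × Option Char × Bool :=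
  match st with
  | (out, some q, escaped) =>
    if escaped then (out ++ [' '], some q, false)
    else if q = '"' ∧ ch = '\\' then (out ++ [' '], some q, true)
    else if ch = q then (out ++ [' '], none, false)
    else (out ++ [' '], some q, escaped)
  | (out, none, escaped) =>
    if ch = '\'' ∨ ch = '"' then (out ++ [' '], some ch, escaped)
    else (out ++ [ch], none, escaped)

def strip_shell_quotes_py (command : String) : String :=
  String.ofList (command.toList.foldl pvAStep ([], none, false)).1

-- ===== PORT B =====
-- span after an opening ': chars consumed (closing quote included) and the rest (Source B's command.find)
def pvSpanSingle : List Char → Nat × List Char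
  | [] => (0, [])
  | c :: cs =>
    if c = '\'' then (1, cs)
    else ((pvSpanSingle cs).1 + 1, (pvSpanSingle cs).2)

-- span after an opening ": the inner while-loop of Source B (a backslash skips the next char)
def pvSpanDouble : List Char → Nat × List Char
  | [] => (0, [])
  | c :: cs =>
    if c = '\\' then
      match cs with
      | [] => (1, [])
      | _ :: cs' => ((pvSpanDouble cs').1 + 2, (pvSpanDouble cs').2)
    else if c = '"' then (1, cs)
    else ((pvSpanDouble cs).1 + 1, (pvSpanDouble cs).2)

theorem pvSpanSingle_len (cs : List Char) : (pvSpanSingle cs).2.length ≤ cs.length := by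
  fun_induction pvSpanSingle cs <;> simp_all <;> omega

theorem pvSpanDouble_len (cs : List Char) : (pvSpanDouble cs).2.length ≤ cs.length := by
  fun_induction pvSpanDouble cs <;> simp_all <;> omega

-- Source B's outer while-loop
def pvAltGo : List Char → List Char
  | [] => []
  | c :: cs =>
    if c = '\'' then
      List.replicate ((pvSpanSingle cs).1 + 1) ' ' ++ pvAltGo (pvSpanSingle cs).2
    else if c = '"' then
      List.replicate ((pvSpanDouble cs).1 + 1) ' ' ++ pvAltGo (pvSpanDouble cs).2
    else c :: pvAltGo cs
termination_by l => l.length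
decreasing_by
  · have := pvSpanSingle_len cs; simp; omega
  · have := pvSpanDouble_len cs; simp; omega
  · simp

def strip_shell_quotes_py_alt (command : String) : String :=
  String.ofList (pvAltGo command.toList)

-- ===== PRECONDITION & SPEC =====
def Spec_strip_shell_quotes_py (command : String) (out : String) : Prop := out = strip_shell_quotes_py_alt command
instance (command : String) (out : String) : Decidable (Spec_strip_shell_quotes_py command out) := by unfold Spec_strip_shell_quotes_py; infer_instance

-- ===== CLAIM (what is proved, stated in full; the proofs are below) =====
def Claim_equal_strip_shell_quotes_py : Prop := ∀ (command : String), Dom_strip_shell_quotes_py command → Spec_strip_shell_quotes_py command (strip_shell_quotes_py command)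

-- ===== LEMMAS AND PROOFS =====

-- A's loop as direct recursion carrying (quote, escaped), output built in front
def pvARun : Option Char → Bool → List Char → List Char
  | _, _, [] => []
  | some q, e, ch :: cs =>
    if e then ' ' :: pvARun (some q) false cs
    else if q = '"' ∧ ch = '\\' then ' ' :: pvARun (some q) true cs
    else if ch = q then ' ' :: pvARun none false cs
    else ' ' :: pvARun (some q) e cs
  | none, e, ch :: cs =>
    if ch = '\'' ∨ ch = '"' then ' ' :: pvARun (some ch) e cs
    else ch :: pvARun none e cs

theorem pvFoldl_eq_aRun (l : List Char) (out : List Char) (q : Option Char) (e : Bool) :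
    (l.foldl pvAStep (out, q, e)).1 = out ++ pvARun q e l := by
  induction l generalizing out q e with
  | nil => simp [pvARun]
  | cons ch cs ih =>
    match q with
    | some qc =>
      simp only [List.foldl_cons, pvAStep, pvARun]
      split_ifs <;> simp [ih]
    | none =>
      simp only [List.foldl_cons, pvAStep, pvARun]
      split_ifs <;> simp [ih]

theorem pvARun_single (cs : List Char) :
    pvARun (some '\'') false cs =
      List.replicate (pvSpanSingle cs).1 ' ' ++ pvARun none false (pvSpanSingle cs).2 := by
  fun_induction pvSpanSingle cs <;> simp_all [pvARun, List.replicate_succ]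

theorem pvARun_double (cs : List Char) :
    pvARun (some '"') false cs =
      List.replicate (pvSpanDouble cs).1 ' ' ++ pvARun none false (pvSpanDouble cs).2 := by
  fun_induction pvSpanDouble cs <;> simp_all [pvARun, List.replicate_succ]

theorem pvARun_eq_altGo (l : List Char) : pvARun none false l = pvAltGo l := by
  fun_induction pvAltGo l <;> simp_all [pvARun, pvARun_single, pvARun_double, List.replicate_succ]

-- ===== VERDICT (by name: the statement is the Claim_ definition above) =====
theorem strip_shell_quotes_py_spec : Claim_equal_strip_shell_quotes_py := by
  intro command _
  unfold Spec_strip_shell_quotes_py strip_shell_quotes_py strip_shell_quotes_py_alt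
  rw [pvFoldl_eq_aRun, pvARun_eq_altGo]
  simp
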